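-- pv_equiv track=rewrite | github.com/rakalex/apple_bleee | ble_read_state.py | parse_struct
-- ===== SOURCE A (Python) =====
-- def parse_struct(data, struct):
--     result = {}
--     i = 0
--     for key in struct:
--         if key == 999:
--             result[key] = data[i:]
--         else:
--             result[key] = data[i:i + struct[key] * 2]
--         i = i + struct[key] * 2
--     return result
-- ===== SOURCE B (Python) =====
-- def parse_struct(data, struct):
--     # Two-pass decomposition: build a start-offset table, then map keys to slices.
--     offsets = []
--     i = 0
--     for key in struct:
--         offsets.append(i)
--         i += struct[key] * 2
--     return {key: (data[start:] if key == 999 else data[start:start + struct[key] * 2])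
--             for key, start in zip(struct, offsets)}
-- ===== Notes on version B (the rewrite author's own statement) =====
-- stated objective: alternative
-- what changed: Replaces A's single incremental-counter loop (dict built while advancing i) with a two-pass decomposition: first a start-offset table accumulated from struct[key]*2, then a dict comprehension over zip(struct, offsets) producing each slice.
import Mathlib
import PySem

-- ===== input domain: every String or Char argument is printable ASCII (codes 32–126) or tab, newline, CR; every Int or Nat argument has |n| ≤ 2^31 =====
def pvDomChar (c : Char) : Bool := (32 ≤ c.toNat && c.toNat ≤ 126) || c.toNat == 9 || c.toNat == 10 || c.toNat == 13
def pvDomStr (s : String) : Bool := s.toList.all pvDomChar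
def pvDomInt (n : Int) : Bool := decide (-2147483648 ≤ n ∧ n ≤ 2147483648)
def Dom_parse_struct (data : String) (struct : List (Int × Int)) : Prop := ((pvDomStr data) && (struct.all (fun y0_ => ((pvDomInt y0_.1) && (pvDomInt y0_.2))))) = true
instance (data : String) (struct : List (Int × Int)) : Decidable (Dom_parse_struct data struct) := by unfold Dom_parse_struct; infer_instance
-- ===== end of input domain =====

-- B replaces A's single incremental-counter loop with a two-pass decomposition
-- (start-offset table, then a comprehension over zip); objective: alternative, same cost.

-- ===== PORT A =====
-- A's loop: for key in struct (dict iteration), carrying (result, i); struct[key] is a dict lookup.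
def pvA_go (data : List Char) (d : PySem.Dict Int Int) (rest : List (Int × Int))
    (result : PySem.Dict Int String) (i : Int) : PySem.Dict Int String :=
  match rest with
  | [] => result
  | kv :: rest =>
    let key := kv.1
    let sz := PySem.Dict.getD d key 0
    let piece := if key == 999 then PySem.List.slice data (some i) none
                 else PySem.List.slice data (some i) (some (i + sz * 2))
    pvA_go data d rest (PySem.Dict.insert result key (String.ofList piece)) (i + sz * 2)

def parse_struct (data : String) (struct : List (Int × Int)) : List (Int × String) :=
  let d := PySem.Dict.ofList struct
  (pvA_go data.toList d d.items PySem.Dict.empty 0).items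

-- ===== PORT B =====
-- B pass 1: the start-offset table (one offset per key, accumulated from struct[key]*2).
def pvB_offsets (d : PySem.Dict Int Int) (rest : List (Int × Int)) (i : Int) : List Int :=
  match rest with
  | [] => []
  | kv :: rest => i :: pvB_offsets d rest (i + PySem.Dict.getD d kv.1 0 * 2)

-- B pass 2: the dict comprehension over zip(struct, offsets).
def pvB_comp (data : List Char) (d : PySem.Dict Int Int)
    (pairs : List ((Int × Int) × Int)) (r : PySem.Dict Int String) : PySem.Dict Int String :=
  pairs.foldl (fun r kvs =>
    let key := kvs.1.1
    let start := kvs.2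
    let piece := if key == 999 then PySem.List.slice data (some start) none
                 else PySem.List.slice data (some start) (some (start + PySem.Dict.getD d key 0 * 2))
    PySem.Dict.insert r key (String.ofList piece)) r

def parse_struct_alt (data : String) (struct : List (Int × Int)) : List (Int × String) :=
  let d := PySem.Dict.ofList struct
  let offsets := pvB_offsets d d.items 0
  (pvB_comp data.toList d (d.items.zip offsets) PySem.Dict.empty).items

-- ===== PRECONDITION & SPEC =====
def Spec_parse_struct (data : String) (struct : List (Int × Int)) (out : List (Int × String)) : Prop := out = parse_struct_alt data struct
instance (data : String) (struct : List (Int × Int)) (out : List (Int × String)) : Decidable (Spec_parse_struct data struct out) := by unfold Spec_parse_struct; infer_instance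

-- ===== CLAIM (what is proved, stated in full; the proofs are below) =====
def Claim_equal_parse_struct : Prop := ∀ (data : String) (struct : List (Int × Int)), Dom_parse_struct data struct → Spec_parse_struct data struct (parse_struct data struct)

-- ===== LEMMAS AND PROOFS =====
theorem pvA_eq_pvB (data : List Char) (d : PySem.Dict Int Int) :
    ∀ (rest : List (Int × Int)) (r : PySem.Dict Int String) (i : Int),
      pvA_go data d rest r i = pvB_comp data d (rest.zip (pvB_offsets d rest i)) r := by
  intro rest
  induction rest with
  | nil => intro r i; simp [pvA_go, pvB_offsets, pvB_comp]
  | cons kv rest ih =>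
    intro r i
    simp only [pvA_go, pvB_offsets, List.zip_cons_cons, pvB_comp, List.foldl_cons]
    exact ih _ _

-- ===== VERDICT (by name: the statement is the Claim_ definition above) =====
theorem parse_struct_spec : Claim_equal_parse_struct := by
  intro data struct _
  unfold Spec_parse_struct parse_struct parse_struct_alt
  show (pvA_go data.toList (PySem.Dict.ofList struct) (PySem.Dict.ofList struct).items PySem.Dict.empty 0).items = _
  rw [pvA_eq_pvB]
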